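-- pv_equiv track=rewrite | github.com/Yota-pti320/NLP_assignment_2 | code/identification.py | group_rows_by_sents
-- ===== SOURCE A (Python) =====
-- from typing import List
--
-- def group_rows_by_sents(rows: List) -> List[List]:
--     """
--     List of rows -> List of sentences of the rows
--     """
--     sents = []
--     sent = []
--     for row in rows:
--         if len(row) > 1:
--             sent.append(row)
--         else:
--             sents.append(sent)
--             sent = []
--     return sents
-- ===== SOURCE B (Python) =====
-- def group_rows_by_sents(rows):
--     """
--     List of rows -> List of sentences of the rows
--     """
--     delims = [i for i, row in enumerate(rows) if len(row) <= 1]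
--     sents = []
--     start = 0
--     for p in delims:
--         sents.append(rows[start:p])
--         start = p + 1
--     return sents
-- ===== Notes on version B (the rewrite author's own statement) =====
-- stated objective: alternative
-- what changed: Instead of accumulating the current sentence row by row, B first collects the indices of all delimiter rows (len <= 1) and then emits each sentence as a slice rows[start:p] between consecutive delimiters, dropping the trailing un-terminated segment.
import Mathlib
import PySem

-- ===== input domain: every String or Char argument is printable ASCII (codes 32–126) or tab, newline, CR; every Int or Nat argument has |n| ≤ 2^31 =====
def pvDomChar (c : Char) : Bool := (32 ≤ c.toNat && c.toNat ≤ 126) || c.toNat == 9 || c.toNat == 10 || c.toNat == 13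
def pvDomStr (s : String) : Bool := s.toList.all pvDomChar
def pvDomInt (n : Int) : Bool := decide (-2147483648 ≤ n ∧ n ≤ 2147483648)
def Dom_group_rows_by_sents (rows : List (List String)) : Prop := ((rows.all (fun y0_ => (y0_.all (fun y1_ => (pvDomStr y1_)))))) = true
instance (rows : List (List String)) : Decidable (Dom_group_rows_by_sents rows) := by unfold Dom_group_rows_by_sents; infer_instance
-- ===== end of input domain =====

-- B groups by pre-collected delimiter indices and slicing instead of row-by-row accumulation; same O(n) cost (objective: alternative).

-- ===== PORT A =====
-- A's for-loop over rows with the two accumulators `sents` and `sent`.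
def pvLoopA : List (List String) → List (List (List String)) → List (List String) → List (List (List String))
  | [], sents, _ => sents
  | r :: rs, sents, sent =>
      if r.length > 1 then pvLoopA rs sents (sent ++ [r])
      else pvLoopA rs (sents ++ [sent]) []

def group_rows_by_sents (rows : List (List String)) : List (List (List String)) :=
  pvLoopA rows [] []

-- ===== PORT B =====
-- B's comprehension `[i for i, row in enumerate(rows) if len(row) <= 1]`, ported with the explicit running index of enumerate.
def pvDelimIdx : List (List String) → Nat → List Nat
  | [], _ => []
  | r :: rs, i => if r.length ≤ 1 then i :: pvDelimIdx rs (i + 1) else pvDelimIdx rs (i + 1)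

-- B's for-loop over the delimiter indices, appending the slice rows[start:p].
def pvLoopB (rows : List (List String)) : List Nat → List (List (List String)) → Nat → List (List (List String))
  | [], sents, _ => sents
  | p :: ps, sents, start =>
      pvLoopB rows ps (sents ++ [PySem.List.slice rows (some (start : Int)) (some (p : Int))]) (p + 1)

def group_rows_by_sents_alt (rows : List (List String)) : List (List (List String)) :=
  pvLoopB rows (pvDelimIdx rows 0) [] 0

-- ===== PRECONDITION & SPEC =====
def Spec_group_rows_by_sents (rows : List (List String)) (out : List (List (List String))) : Prop := out = group_rows_by_sents_alt rows
instance (rows : List (List String)) (out : List (List (List String))) : Decidable (Spec_group_rows_by_sents rows out) := by unfold Spec_group_rows_by_sents; infer_instance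

-- ===== CLAIM (what is proved, stated in full; the proofs are below) =====
def Claim_equal_group_rows_by_sents : Prop := ∀ (rows : List (List String)), Dom_group_rows_by_sents rows → Spec_group_rows_by_sents rows (group_rows_by_sents rows)

-- ===== LEMMAS AND PROOFS =====

-- Common characterisation: the sentence list produced from `tail` when the current sentence so far is `sent`.
def pvG : List (List String) → List (List String) → List (List (List String))
  | [], _ => []
  | r :: rs, sent => if r.length > 1 then pvG rs (sent ++ [r]) else sent :: pvG rs []

theorem pvLoopA_eq (tail : List (List String)) :
    ∀ sents sent, pvLoopA tail sents sent = sents ++ pvG tail sent := by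
  induction tail with
  | nil => intro sents sent; simp [pvLoopA, pvG]
  | cons r rs ih =>
      intro sents sent
      by_cases h : r.length > 1 <;> simp [pvLoopA, pvG, h, ih]

theorem pvLoopB_eq (rows : List (List String)) (tail : List (List String)) :
    ∀ (start off : Nat) (sents : List (List (List String))),
      rows.drop off = tail → start ≤ off →
      pvLoopB rows (pvDelimIdx tail off) sents start
        = sents ++ pvG tail ((rows.drop start).take (off - start)) := by
  induction tail with
  | nil => intro start off sents _ _; simp [pvDelimIdx, pvLoopB, pvG]
  | cons r rs ih =>
      intro start off sents hdrop hle
      have hdrop' : rows.drop (off + 1) = rs := by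
        have h1 : rows.drop (off + 1) = (rows.drop off).drop 1 := by
          rw [List.drop_drop]
        rw [h1, hdrop]; rfl
      have hget : rows[off]? = some r := by
        have : (rows.drop off)[0]? = some r := by simp [hdrop]
        simpa [List.getElem?_drop] using this
      by_cases h : r.length > 1
      · have hne : ¬ r.length ≤ 1 := by omega
        have htake : (rows.drop start).take (off + 1 - start)
            = (rows.drop start).take (off - start) ++ [r] := by
          have h1 : off + 1 - start = (off - start) + 1 := by omega
          have h2 : (rows.drop start)[off - start]? = some r := by
            rw [List.getElem?_drop]
            have : start + (off - start) = off := by omega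
            rw [this]; exact hget
          rw [h1, List.take_add_one, h2]; rfl
        rw [pvDelimIdx]
        simp only [hne, if_false]
        rw [ih start (off + 1) sents hdrop' (by omega), htake]
        simp [pvG, h]
      · have hle1 : r.length ≤ 1 := by omega
        rw [pvDelimIdx]
        simp only [hle1, if_true]
        rw [pvLoopB, ih (off + 1) (off + 1) _ hdrop' (by omega)]
        simp [pvG, h, PySem.List.slice_natCast, List.append_assoc]

theorem group_rows_by_sents_spec : Claim_equal_group_rows_by_sents := by
  intro rows _
  unfold Spec_group_rows_by_sents group_rows_by_sents group_rows_by_sents_alt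
  rw [pvLoopA_eq, pvLoopB_eq rows rows 0 0 [] (by simp) (le_refl 0)]
  simp
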